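-- pv_equiv track=rewrite | github.com/minhphuc477/NPC-AI | core/response_controller.py | _persona_anchor
-- ===== SOURCE A (Python) =====
-- from typing import Callable, Dict, List, Sequence, Tuple
--
-- def _persona_anchor(persona_keywords: Sequence[str]) -> str:
--     preferred = (
--         "strict",
--         "fair",
--         "brief",
--         "suspicious",
--         "talkative",
--         "calm",
--         "caring",
--         "formal",
--         "procedural",
--         "mysterious",
--         "indirect",
--         "precise",
--         "practical",
--     )
--     normalized = [str(x).strip().lower() for x in persona_keywords if str(x).strip()]
--     for term in preferred:
--         if term in normalized:
--             return term
--     return ""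
-- ===== SOURCE B (Python) =====
-- def _persona_anchor(persona_keywords):
--     preferred = (
--         "strict", "fair", "brief", "suspicious", "talkative", "calm",
--         "caring", "formal", "procedural", "mysterious", "indirect",
--         "precise", "practical",
--     )
--     rank = {t: i for i, t in enumerate(preferred)}
--     best_rank = None
--     best_term = ""
--     for x in persona_keywords:
--         s = str(x).strip().lower()
--         if not s:
--             continue
--         r = rank.get(s)
--         if r is not None and (best_rank is None or r < best_rank):
--             best_rank = r
--             best_term = s
--     return best_term
-- ===== Notes on version B (the rewrite author's own statement) =====
-- stated objective: faster
-- what changed: Instead of building the normalized list and then scanning it once per preferred term (up to 13 passes over the input), B precomputes a rank dict over the preferred terms and makes a single pass over the input keywords, tracking the minimum-rank term seen.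
import Mathlib
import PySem

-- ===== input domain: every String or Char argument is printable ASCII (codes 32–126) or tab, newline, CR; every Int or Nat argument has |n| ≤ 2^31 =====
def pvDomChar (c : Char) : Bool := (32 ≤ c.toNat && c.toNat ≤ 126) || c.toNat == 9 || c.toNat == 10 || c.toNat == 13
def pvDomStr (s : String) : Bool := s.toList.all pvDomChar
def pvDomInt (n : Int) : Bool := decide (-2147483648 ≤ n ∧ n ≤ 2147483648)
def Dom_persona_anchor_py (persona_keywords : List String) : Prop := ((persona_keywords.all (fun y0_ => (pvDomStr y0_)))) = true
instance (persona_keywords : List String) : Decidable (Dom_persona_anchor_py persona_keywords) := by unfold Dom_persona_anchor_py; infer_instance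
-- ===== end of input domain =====

-- B replaces A's repeated scans of the normalized list (one per preferred term) by one
-- pass over the input keywords with a rank dictionary, tracking the minimum rank seen.

def pvPreferred : List String :=
  ["strict", "fair", "brief", "suspicious", "talkative", "calm", "caring",
   "formal", "procedural", "mysterious", "indirect", "precise", "practical"]

-- ===== PORT A =====
-- the comprehension [str(x).strip().lower() for x in persona_keywords if str(x).strip()]
def pvNorm1 (x : String) : Option String :=
  if PySem.Str.strip x = "" then none else some (PySem.Str.lower (PySem.Str.strip x))

-- the 'for term in preferred: if term in normalized: return term' loop
def pvALoop (normalized : List String) : List String → String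
  | [] => ""
  | t :: ts => if normalized.contains t then t else pvALoop normalized ts

def persona_anchor_py (persona_keywords : List String) : String :=
  pvALoop (persona_keywords.filterMap pvNorm1) pvPreferred

-- ===== PORT B =====
-- rank = {t: i for i, t in enumerate(preferred)}
def pvRankDict : PySem.Dict String Int :=
  (PySem.List.enumerate pvPreferred).foldl (fun d p => d.insert p.2 p.1) PySem.Dict.empty

-- one iteration of B's single pass (state = (best_rank, best_term))
def pvBStep (best : Option Int × String) (x : String) : Option Int × String :=
  let s := PySem.Str.lower (PySem.Str.strip x)
  if s = "" then best
  else
    match PySem.Dict.get? pvRankDict s with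
    | none => best
    | some r =>
      match best.1 with
      | none => (some r, s)
      | some br => if r < br then (some r, s) else best

def persona_anchor_py_alt (persona_keywords : List String) : String :=
  (persona_keywords.foldl pvBStep (none, "")).2

-- ===== PRECONDITION & SPEC =====
def Spec_persona_anchor_py (persona_keywords : List String) (out : String) : Prop := out = persona_anchor_py_alt persona_keywords
instance (persona_keywords : List String) (out : String) : Decidable (Spec_persona_anchor_py persona_keywords out) := by unfold Spec_persona_anchor_py; infer_instance

-- ===== CLAIM (what is proved, stated in full; the proofs are below) =====
def Claim_equal_persona_anchor_py : Prop := ∀ (persona_keywords : List String), Dom_persona_anchor_py persona_keywords → Spec_persona_anchor_py persona_keywords (persona_anchor_py persona_keywords)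

-- ===== LEMMAS AND PROOFS =====

-- proof-side model of the rank dictionary: preferred terms ranked from i upward
def pvMkR : List String → Int → List (String × Int)
  | [], _ => []
  | p :: ps, i => (p, i) :: pvMkR ps (i + 1)

-- first-match lookup in an association list
def pvLook : List (String × Int) → String → Option Int
  | [], _ => none
  | (k, v) :: rest, s => if k = s then some v else pvLook rest s

-- the fold step of B restricted to actual candidates (rank, term)
def pvMChain (b : Option Int × String) (q : Int × String) : Option Int × String :=
  match b.1 with
  | none => (some q.1, q.2)
  | some br => if q.1 < br then (some q.1, q.2) else b

-- the candidate (rank, term) a single keyword contributes, if any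
def pvCand1 (d : List (String × Int)) (x : String) : Option (Int × String) :=
  let s := PySem.Str.lower (PySem.Str.strip x)
  if s = "" then none else (pvLook d s).map (fun r => (r, s))

-- the candidates B actually acts on, in input order
def pvCands (d : List (String × Int)) (ns : List String) : List (Int × String) :=
  ns.filterMap (pvCand1 d)

lemma pvGet?_eq_look (L : List (String × Int)) (s : String) :
    (PySem.Dict.mk L).get? s = pvLook L s := by
  induction L with
  | nil => simp [PySem.Dict.get?, pvLook]
  | cons p rest ih =>
    obtain ⟨k, v⟩ := p
    rw [PySem.Dict.get?_mk_cons]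
    simp only [pvLook, beq_iff_eq, ih]

lemma pvRankDict_eval : pvRankDict = PySem.Dict.mk (pvMkR pvPreferred 0) := by decide

lemma pvLower_eq_empty {t : String} (h : PySem.Str.lower t = "") : t = "" := by
  have h2 := congrArg String.toList h
  rw [PySem.Str.toList_lower] at h2
  simp only [PySem.Chars.lower] at h2
  have := congrArg String.ofList h2
  simpa using this

lemma pvBStep_eq (b : Option Int × String) (x : String) :
    pvBStep b x = match pvCand1 (pvMkR pvPreferred 0) x with
                  | none => b
                  | some q => pvMChain b q := by
  have hget : ∀ s, PySem.Dict.get? pvRankDict s = pvLook (pvMkR pvPreferred 0) s := by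
    intro s; rw [pvRankDict_eval, pvGet?_eq_look]
  unfold pvBStep pvCand1
  by_cases hs : PySem.Str.lower (PySem.Str.strip x) = ""
  · rw [if_pos hs, if_pos hs]
  · rw [if_neg hs, if_neg hs, hget]
    cases hl : pvLook (pvMkR pvPreferred 0) (PySem.Str.lower (PySem.Str.strip x)) with
    | none => rfl
    | some r => simp [pvMChain]

lemma pvFusion (ns : List String) (b : Option Int × String) :
    ns.foldl pvBStep b = (pvCands (pvMkR pvPreferred 0) ns).foldl pvMChain b := by
  induction ns generalizing b with
  | nil => simp [pvCands]
  | cons x xs ih =>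
    simp only [List.foldl_cons, pvCands, List.filterMap_cons]
    rw [pvBStep_eq b x]
    cases hc : pvCand1 (pvMkR pvPreferred 0) x with
    | none => exact ih b
    | some q => simpa [pvCands] using ih (pvMChain b q)

lemma pvLook_ge : ∀ (pref : List String) (i : Int) (s : String) (r : Int),
    pvLook (pvMkR pref i) s = some r → i ≤ r := by
  intro pref
  induction pref with
  | nil => intro i s r h; simp [pvMkR, pvLook] at h
  | cons p ps ih =>
    intro i s r h
    simp only [pvMkR, pvLook] at h
    by_cases hp : p = s
    · rw [if_pos hp] at h; exact le_of_eq (Option.some.inj h)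
    · rw [if_neg hp] at h; have := ih (i + 1) s r h; omega

lemma pvAbsorb : ∀ (l : List (Int × String)) (r : Int) (t : String),
    (∀ q ∈ l, r ≤ q.1) → l.foldl pvMChain (some r, t) = (some r, t) := by
  intro l
  induction l with
  | nil => intro r t _; rfl
  | cons q l ih =>
    intro r t h
    have hq : r ≤ q.1 := h q (by simp)
    have : pvMChain (some r, t) q = (some r, t) := by
      simp [pvMChain]; omega
    rw [List.foldl_cons, this]
    exact ih r t (fun q' hq' => h q' (by simp [hq']))

lemma pvReach : ∀ (l : List (Int × String)) (i : Int) (p : String) (b : Option Int × String),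
    (i, p) ∈ l → (∀ q ∈ l, i ≤ q.1 ∧ (q.1 = i → q.2 = p)) →
    (b.1 = none ∨ ∃ br, b.1 = some br ∧ i < br) →
    l.foldl pvMChain b = (some i, p) := by
  intro l
  induction l with
  | nil => intro i p b hm; simp at hm
  | cons q l ih =>
    intro i p b hm hall hb
    obtain ⟨b1, b2⟩ := b
    rw [List.foldl_cons]
    by_cases hqi : q.1 = i
    · have hqp : q.2 = p := (hall q (by simp)).2 hqi
      have hq : q = (i, p) := by obtain ⟨q1, q2⟩ := q; simp_all
      have hstep : pvMChain (b1, b2) q = (some i, p) := by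
        rcases hb with hb | ⟨br, hb, hbr⟩ <;> simp only at hb <;> subst hb
        · simp [pvMChain, hq]
        · simp [pvMChain, hq, hbr]
      rw [hstep]
      exact pvAbsorb l i p (fun q' hq' => (hall q' (by simp [hq'])).1)
    · have hqgt : i < q.1 := by
        have := (hall q (by simp)).1; omega
      have hm' : (i, p) ∈ l := by
        rcases List.mem_cons.mp hm with h | h
        · exact absurd (congrArg Prod.fst h.symm) (by simpa using hqi)
        · exact h
      apply ih i p _ hm' (fun q' hq' => hall q' (by simp [hq']))
      rcases hb with hb | ⟨br, hb, hbr⟩ <;> simp at hb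
      · subst hb; right; exact ⟨q.1, rfl, hqgt⟩
      · subst hb
        simp only [pvMChain]
        by_cases hc : q.1 < br
        · rw [if_pos hc]; right; exact ⟨q.1, rfl, hqgt⟩
        · rw [if_neg hc]; right; exact ⟨br, rfl, hbr⟩

lemma pvCands_mem {d : List (String × Int)} {ns : List String} {q : Int × String}
    (h : q ∈ pvCands d ns) :
    ∃ x ∈ ns, PySem.Str.lower (PySem.Str.strip x) = q.2 ∧ q.2 ≠ "" ∧ pvLook d q.2 = some q.1 := by
  obtain ⟨x, hx, hfx⟩ := List.mem_filterMap.mp h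
  simp only [pvCand1] at hfx
  by_cases hs : PySem.Str.lower (PySem.Str.strip x) = ""
  · rw [if_pos hs] at hfx; exact absurd hfx (by simp)
  · rw [if_neg hs] at hfx
    obtain ⟨r, hr, hq⟩ := Option.map_eq_some_iff.mp hfx
    exact ⟨x, hx, by rw [← hq], by rw [← hq]; exact hs, by rw [← hq]; exact hr⟩

lemma pvMain : ∀ (pref : List String) (i : Int) (ns : List String),
    ((pvCands (pvMkR pref i) ns).foldl pvMChain (none, "")).2
      = pvALoop (ns.filterMap pvNorm1) pref := by
  intro pref
  induction pref with
  | nil =>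
    intro i ns
    have : pvCands (pvMkR [] i) ns = [] := by
      simp only [pvCands, List.filterMap_eq_nil_iff]
      intro x _; simp [pvCand1, pvMkR, pvLook]
    rw [this]; rfl
  | cons p ps ih =>
    intro i ns
    by_cases hp : p ∈ ns.filterMap pvNorm1
    · -- A returns p; B's minimum-rank candidate is (i, p)
      obtain ⟨x, hx, hnx⟩ := List.mem_filterMap.mp hp
      simp only [pvNorm1] at hnx
      by_cases hsx : PySem.Str.strip x = ""
      · rw [if_pos hsx] at hnx; exact absurd hnx (by simp)
      rw [if_neg hsx] at hnx
      have hpx : PySem.Str.lower (PySem.Str.strip x) = p := by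
        exact Option.some.inj hnx
      have hpne : p ≠ "" := by
        intro h0; exact hsx (pvLower_eq_empty (hpx.trans h0))
      have hlookp : pvLook (pvMkR (p :: ps) i) p = some i := by
        simp [pvMkR, pvLook]
      have hmem : (i, p) ∈ pvCands (pvMkR (p :: ps) i) ns := by
        apply List.mem_filterMap.mpr
        refine ⟨x, hx, ?_⟩
        simp only [pvCand1, hpx]
        rw [if_neg hpne, hlookp]
        rfl
      have hall : ∀ q ∈ pvCands (pvMkR (p :: ps) i) ns, i ≤ q.1 ∧ (q.1 = i → q.2 = p) := by
        intro q hq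
        obtain ⟨y, _, _, hne, hlk⟩ := pvCands_mem hq
        simp only [pvMkR, pvLook] at hlk
        by_cases hpq : p = q.2
        · rw [if_pos hpq] at hlk
          exact ⟨le_of_eq (Option.some.inj hlk), fun _ => hpq.symm⟩
        · rw [if_neg hpq] at hlk
          have := pvLook_ge ps (i + 1) q.2 q.1 hlk
          exact ⟨by omega, fun h => absurd h (by omega)⟩
      rw [pvReach _ i p _ hmem hall (Or.inl rfl)]
      simp [pvALoop, hp]
    · -- p absent: B never sees rank i, A moves on
      have hEq : pvCands (pvMkR (p :: ps) i) ns = pvCands (pvMkR ps (i + 1)) ns := by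
        apply List.filterMap_congr
        intro x hx
        simp only [pvCand1]
        by_cases hs : PySem.Str.lower (PySem.Str.strip x) = ""
        · rw [if_pos hs, if_pos hs]
        · rw [if_neg hs, if_neg hs]
          have hxp : p ≠ PySem.Str.lower (PySem.Str.strip x) := by
            intro h
            apply hp
            apply List.mem_filterMap.mpr
            refine ⟨x, hx, ?_⟩
            have hsx : PySem.Str.strip x ≠ "" := by
              intro h0
              apply hs
              rw [h0]; rfl
            simp [pvNorm1, hsx, ← h]
          simp only [pvMkR, pvLook, if_neg hxp]
      rw [hEq, ih (i + 1) ns]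
      simp [pvALoop, hp]

-- ===== VERDICT (by name: the statement is the Claim_ definition above) =====
theorem persona_anchor_py_spec : Claim_equal_persona_anchor_py := by
  intro ks _
  show persona_anchor_py ks = persona_anchor_py_alt ks
  unfold persona_anchor_py persona_anchor_py_alt
  rw [pvFusion, pvMain]
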